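-- pv_equiv track=rewrite | github.com/Zeydel/Advent-Of-Code | AoC15/Day24/Day24.py | getSubsetsOfSize
-- ===== SOURCE A (Python) =====
-- from itertools import combinations
--
-- def isDivisionPossible(presents, subset, size):
--
--     # Rmove the presents that we already know to sum to the sum
--     presents = [p for p in presents if p not in subset]
--
--     # For every possible lenght of combination
--     for i in range(len(presents) + 1):
--         # Create all the combinations of that length
--         for subset in combinations(presents, i):
--             # Check if the sum is equal to the desired sum AND either the remaining presents also make up the sum
--             #                                              OR  the remaining presents can be divided as to make up the sum
--             if sum(subset) == size and (sum(presents) == 2*size or isDivisionPossible(presents, subset, size)):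
--                 return True
--     # Return false if we haven't found anything
--     return False
--
-- def getSubsetsOfSize(presents, size):
--
--     # Init empty list
--     subsets = []
--
--     # For all possible subset length
--     for i in range(len(presents) + 1):
--         # If we have found smaller subsets, break the loop
--         if len(subsets) > 0:
--             break
--         # For every combination of the given length
--         for subset in combinations(presents, i):
--             # Check that the presents sum up to the desired number, and that
--             # we can divide the remaining presents into sets of that number
--             if sum(subset) == size and isDivisionPossible(presents, subset, size):
--                subsets.append(subset)
--
--     return subsets
-- ===== SOURCE B (Python) =====
-- def _subsets(items):
--     # all subsets as tuples, in lexicographic order of index sequences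
--     if not items:
--         return [()]
--     rest = _subsets(items[1:])
--     return [(items[0],) + s for s in rest] + rest
--
-- def _canSplit(rest, size):
--     # can `rest` be peeled into groups summing to `size` (value-based removal,
--     # like the original)?  Base case = the rest splits in exactly two halves,
--     # decided by a reachable-sums set instead of enumerating combinations.
--     if sum(rest) == 2 * size:
--         sums = {0}
--         for p in rest:
--             sums = sums | {s + p for s in sums}
--         return size in sums
--     for c in _subsets(rest):
--         if sum(c) == size and _canSplit([p for p in rest if p not in c], size):
--             return True
--     return False
--
-- def getSubsetsOfSize(presents, size):
--     # bucket the powerset by subset length (one traversal), then scan the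
--     # buckets in increasing length and return the first feasible bucket
--     groups = [[] for _ in range(len(presents) + 1)]
--     for s in _subsets(presents):
--         groups[len(s)].append(s)
--     for g in groups:
--         found = [s for s in g
--                  if sum(s) == size and _canSplit([p for p in presents if p not in s], size)]
--         if found:
--             return found
--     return []
-- ===== Notes on version B (the rewrite author's own statement) =====
-- stated objective: alternative
-- what changed: B builds the powerset once and buckets it by length instead of re-running itertools.combinations per length, and decides the two-equal-halves base case of the division check with a reachable-sums set (iterative subset-sum closure) instead of scanning combinations for a matching sum.
import Mathlib
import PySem

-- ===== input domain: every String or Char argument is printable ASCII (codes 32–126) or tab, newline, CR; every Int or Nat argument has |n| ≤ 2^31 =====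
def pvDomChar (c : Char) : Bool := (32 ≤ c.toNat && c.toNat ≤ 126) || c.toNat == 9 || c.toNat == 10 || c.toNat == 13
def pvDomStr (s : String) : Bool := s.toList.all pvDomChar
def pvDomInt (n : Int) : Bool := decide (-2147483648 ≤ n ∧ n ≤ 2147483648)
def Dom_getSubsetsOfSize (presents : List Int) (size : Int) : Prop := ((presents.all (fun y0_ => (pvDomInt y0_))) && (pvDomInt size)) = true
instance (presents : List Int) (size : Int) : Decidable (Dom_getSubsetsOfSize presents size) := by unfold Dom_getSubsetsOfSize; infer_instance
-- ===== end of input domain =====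

-- B replaces A's per-length itertools.combinations enumeration by one powerset traversal
-- bucketed by length, and decides the two-halves base case of the division check with a
-- reachable-sums set instead of scanning combinations (objective: alternative).

-- ===== PORT A =====

-- itertools.combinations(l, i): all length-i sub-tuples, lexicographic by positions
def pyCombos (l : List Int) : Nat → List (List Int)
  | 0 => [[]]
  | k + 1 =>
    match l with
    | [] => []
    | x :: xs => (pyCombos xs k).map (x :: ·) ++ pyCombos xs (k + 1)

-- isDivisionPossible; the fuel only makes the unbounded Python recursion total: every
-- recursive call strictly shortens the (value-filtered) list, so fuel len+1 is never
-- exhausted on the calls A actually performs under Pre_.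
def isDivA : Nat → List Int → List Int → Int → Bool
  | 0, _, _, _ => false
  | fuel + 1, presents, subset, size =>
    let rest := presents.filter (fun p => !(subset.contains p))
    (List.range (rest.length + 1)).any (fun i =>
      (pyCombos rest i).any (fun c =>
        c.sum == size && (rest.sum == 2 * size || isDivA fuel rest c size)))

-- the outer 'for i in range(len+1): if subsets: break; for subset in combinations…'
def loopA (presents : List Int) (size : Int) : List Nat → List (List Int) → List (List Int)
  | [], subsets => subsets
  | i :: is, subsets =>
    if subsets.length > 0 then subsets
    else loopA presents size is
      (subsets ++ (pyCombos presents i).filter (fun s =>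
        s.sum == size && isDivA (presents.length + 1) presents s size))

def getSubsetsOfSize (presents : List Int) (size : Int) : List (List Int) :=
  loopA presents size (List.range (presents.length + 1)) []

-- ===== PORT B =====

-- _subsets: the whole powerset, lexicographic by index sequences
def pySubsets : List Int → List (List Int)
  | [] => [[]]
  | x :: xs => (pySubsets xs).map (x :: ·) ++ pySubsets xs

-- _canSplit; same fuel discipline as isDivA (the Python recursion strictly shortens rest)
def canSplitB : Nat → List Int → Int → Bool
  | 0, _, _ => false
  | fuel + 1, rest, size =>
    if rest.sum == 2 * size then
      PySem.Set.contains
        (rest.foldl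
          (fun sums p => PySem.Set.union sums (PySem.Set.ofList (sums.map (· + p))))
          (PySem.Set.ofList [0]))
        size
    else
      (pySubsets rest).any (fun c =>
        c.sum == size && canSplitB fuel (rest.filter (fun p => !(c.contains p))) size)

-- 'for g in groups: found = […]; if found: return found'
def loopB (presents : List Int) (size : Int) : List (List (List Int)) → List (List Int)
  | [] => []
  | g :: gs =>
    let found := g.filter (fun s =>
      s.sum == size &&
        canSplitB (presents.length + 1) (presents.filter (fun p => !(s.contains p))) size)
    if found.length > 0 then found else loopB presents size gs

def getSubsetsOfSize_alt (presents : List Int) (size : Int) : List (List Int) :=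
  let groups := (pySubsets presents).foldl
    (fun gs s => gs.set s.length (gs.getD s.length [] ++ [s]))
    (List.replicate (presents.length + 1) [])
  loopB presents size groups

-- ===== PRECONDITION & SPEC =====

-- Pre_ excludes size = 0 with a nonzero total, exactly where Python A's
-- isDivisionPossible recurses on the empty combination forever (RecursionError).
def Pre_getSubsetsOfSize (presents : List Int) (size : Int) : Prop :=
  size ≠ 0 ∨ presents.sum = 0
instance (presents : List Int) (size : Int) : Decidable (Pre_getSubsetsOfSize presents size) := by unfold Pre_getSubsetsOfSize; infer_instance

def pvWitness_getSubsetsOfSize : List Int × Int := ([1, 5, 6, 2, 4, 3], 7)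

def Spec_getSubsetsOfSize (presents : List Int) (size : Int) (out : List (List Int)) : Prop := out = getSubsetsOfSize_alt presents size
instance (presents : List Int) (size : Int) (out : List (List Int)) : Decidable (Spec_getSubsetsOfSize presents size out) := by unfold Spec_getSubsetsOfSize; infer_instance

-- ===== CLAIM (what is proved, stated in full; the proofs are below) =====
def Claim_equal_getSubsetsOfSize : Prop := ∀ (presents : List Int) (size : Int), Dom_getSubsetsOfSize presents size → Pre_getSubsetsOfSize presents size → Spec_getSubsetsOfSize presents size (getSubsetsOfSize presents size)

-- ===== LEMMAS AND PROOFS =====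

theorem length_le_of_mem_pySubsets : ∀ (l : List Int) (s : List Int), s ∈ pySubsets l → s.length ≤ l.length := by
  intro l
  induction l with
  | nil => intro s h; simp [pySubsets] at h; simp [h]
  | cons x xs ih =>
    intro s h
    simp [pySubsets] at h
    rcases h with ⟨t, ht, rfl⟩ | h
    · simpa using Nat.succ_le_succ (ih t ht)
    · exact Nat.le_succ_of_le (ih s h)

theorem filter_len_pySubsets : ∀ (l : List Int) (i : Nat),
    (pySubsets l).filter (fun s => s.length == i) = pyCombos l i := by
  intro l
  induction l with
  | nil =>
    intro i
    cases i with
    | zero => simp [pySubsets, pyCombos]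
    | succ k => simp [pySubsets, pyCombos]
  | cons x xs ih =>
    intro i
    cases i with
    | zero =>
      rw [show pySubsets (x :: xs) = (pySubsets xs).map (x :: ·) ++ pySubsets xs from rfl,
        List.filter_append, List.filter_map, ih 0]
      simp [pyCombos, Function.comp_def]
    | succ k =>
      have hpred : (fun s : List Int => ((x :: s).length == k + 1)) = (fun s => s.length == k) := by
        funext s; by_cases h : s.length = k <;> simp [h]
      show ((pySubsets xs).map (x :: ·) ++ pySubsets xs).filter (fun s => s.length == k + 1)
          = (pyCombos xs k).map (x :: ·) ++ pyCombos xs (k + 1)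
      rw [List.filter_append, List.filter_map, Function.comp_def, hpred, ih k, ih (k+1)]

theorem mem_pyCombos_iff (l : List Int) (i : Nat) (c : List Int) :
    c ∈ pyCombos l i ↔ c ∈ pySubsets l ∧ c.length = i := by
  rw [← filter_len_pySubsets, List.mem_filter]
  simp

theorem any_range_combos (l : List Int) (p : List Int → Bool) :
    ((List.range (l.length + 1)).any (fun i => (pyCombos l i).any p)) = (pySubsets l).any p := by
  rw [Bool.eq_iff_iff]
  simp only [List.any_eq_true, List.mem_range]
  constructor
  · rintro ⟨i, _, c, hc, hp⟩
    exact ⟨c, (mem_pyCombos_iff l i c).mp hc |>.1, hp⟩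
  · rintro ⟨c, hc, hp⟩
    refine ⟨c.length, Nat.lt_succ_of_le (length_le_of_mem_pySubsets l c hc), c, ?_, hp⟩
    exact (mem_pyCombos_iff l c.length c).mpr ⟨hc, rfl⟩

theorem mem_sums_fold : ∀ (l : List Int) (S : List Int) (x : Int),
    x ∈ l.foldl (fun sums p => PySem.Set.union sums (PySem.Set.ofList (sums.map (· + p)))) S ↔
      ∃ c ∈ pySubsets l, ∃ s0 ∈ S, x = s0 + c.sum := by
  intro l
  induction l with
  | nil => intro S x; simp [pySubsets]
  | cons p ps ih =>
    intro S x
    rw [List.foldl_cons, ih]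
    constructor
    · rintro ⟨c, hc, s0, hs0, rfl⟩
      rw [PySem.Set.mem_union, PySem.Set.mem_ofList, List.mem_map] at hs0
      rcases hs0 with hs0 | ⟨t, ht, rfl⟩
      · refine ⟨c, ?_, s0, hs0, rfl⟩
        rw [show pySubsets (p :: ps) = (pySubsets ps).map (p :: ·) ++ pySubsets ps from rfl]
        exact List.mem_append_right _ hc
      · refine ⟨p :: c, ?_, t, ht, ?_⟩
        · rw [show pySubsets (p :: ps) = (pySubsets ps).map (p :: ·) ++ pySubsets ps from rfl]
          exact List.mem_append_left _ (List.mem_map.mpr ⟨c, hc, rfl⟩)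
        · simp; ring
    · rintro ⟨c, hc, s0, hs0, rfl⟩
      simp only [pySubsets, List.mem_append, List.mem_map] at hc
      rcases hc with ⟨t, ht, rfl⟩ | hc
      · refine ⟨t, ht, s0 + p, ?_, ?_⟩
        · rw [PySem.Set.mem_union, PySem.Set.mem_ofList, List.mem_map]
          exact Or.inr ⟨s0, hs0, rfl⟩
        · simp; ring
      · exact ⟨c, hc, s0, by rw [PySem.Set.mem_union]; exact Or.inl hs0, rfl⟩

theorem canSplitB_base (rest : List Int) (size : Int) :
    PySem.Set.contains
      (rest.foldl
        (fun sums p => PySem.Set.union sums (PySem.Set.ofList (sums.map (· + p))))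
        (PySem.Set.ofList [0]))
      size = (pySubsets rest).any (fun c => c.sum == size) := by
  rw [Bool.eq_iff_iff, PySem.Set.contains_iff, mem_sums_fold, List.any_eq_true]
  constructor
  · rintro ⟨c, hc, s0, hs0, rfl⟩
    simp [PySem.Set.mem_ofList] at hs0
    subst hs0
    exact ⟨c, hc, by simp⟩
  · rintro ⟨c, hc, hp⟩
    refine ⟨c, hc, 0, by simp [PySem.Set.mem_ofList], ?_⟩
    have := (beq_iff_eq).mp hp
    omega

theorem isDivA_eq : ∀ (fuel : Nat) (presents subset : List Int) (size : Int),
    isDivA fuel presents subset size =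
      canSplitB fuel (presents.filter (fun p => !(subset.contains p))) size := by
  intro fuel
  induction fuel with
  | zero => intro presents subset size; rfl
  | succ fuel ih =>
    intro presents subset size
    show (List.range ((presents.filter (fun p => !(subset.contains p))).length + 1)).any _ = _
    set rest := presents.filter (fun p => !(subset.contains p)) with hrest
    by_cases h2 : rest.sum = 2 * size
    · have hb : (rest.sum == 2 * size) = true := by simp [h2]
      calc (List.range (rest.length + 1)).any (fun i =>
              (pyCombos rest i).any (fun c =>
                c.sum == size && (rest.sum == 2 * size || isDivA fuel rest c size)))
          = (List.range (rest.length + 1)).any (fun i =>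
              (pyCombos rest i).any (fun c => c.sum == size)) := by
            simp [hb]
        _ = (pySubsets rest).any (fun c => c.sum == size) := any_range_combos rest _
        _ = canSplitB (fuel + 1) rest size := by
            rw [show canSplitB (fuel + 1) rest size = if rest.sum == 2 * size then _ else _ from rfl]
            rw [hb]
            simp only [if_true]
            exact (canSplitB_base rest size).symm
    · have hb : (rest.sum == 2 * size) = false := by simp [h2]
      calc (List.range (rest.length + 1)).any (fun i =>
              (pyCombos rest i).any (fun c =>
                c.sum == size && (rest.sum == 2 * size || isDivA fuel rest c size)))
          = (List.range (rest.length + 1)).any (fun i =>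
              (pyCombos rest i).any (fun c =>
                c.sum == size && canSplitB fuel (rest.filter (fun p => !(c.contains p))) size)) := by
            simp only [hb, Bool.false_or, ih]
        _ = (pySubsets rest).any (fun c =>
                c.sum == size && canSplitB fuel (rest.filter (fun p => !(c.contains p))) size) :=
            any_range_combos rest _
        _ = canSplitB (fuel + 1) rest size := by
            show _ = if rest.sum == 2 * size then _ else _
            rw [hb]
            simp only [Bool.false_eq_true, if_false]

theorem foldl_upd_getElem? : ∀ (L : List (List Int)) (gs : List (List (List Int))) (i : Nat),
    (∀ s ∈ L, s.length < gs.length) →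
    (L.foldl (fun gs s => gs.set s.length (gs.getD s.length [] ++ [s])) gs)[i]? =
      gs[i]?.map (fun g => g ++ L.filter (fun s => s.length == i)) := by
  intro L
  induction L with
  | nil =>
    intro gs i _
    simp
  | cons s L ih =>
    intro gs i h
    rw [List.foldl_cons, ih _ i (fun t ht => by rw [List.length_set]; exact h t (List.mem_cons_of_mem s ht))]
    have hs : s.length < gs.length := h s (List.mem_cons_self)
    rw [List.getElem?_set]
    by_cases hsi : s.length = i
    · subst hsi
      simp only [if_pos hs]
      rw [List.getD_eq_getElem?_getD, List.getElem?_eq_getElem hs]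
      simp
    · simp only [if_neg hsi]
      rw [List.filter_cons]
      have : (s.length == i) = false := by simp [hsi]
      rw [this]
      simp

theorem buckets_eq (presents : List Int) :
    (pySubsets presents).foldl
      (fun gs s => gs.set s.length (gs.getD s.length [] ++ [s]))
      (List.replicate (presents.length + 1) []) =
    (List.range (presents.length + 1)).map
      (fun i => (pySubsets presents).filter (fun s => s.length == i)) := by
  apply List.ext_getElem?
  intro i
  rw [foldl_upd_getElem? _ _ i (fun s hs => by
    rw [List.length_replicate]
    exact Nat.lt_succ_of_le (length_le_of_mem_pySubsets presents s hs))]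
  by_cases hi : i < presents.length + 1
  · rw [List.getElem?_eq_getElem (by simpa using hi), List.getElem?_eq_getElem (by simpa using hi)]
    simp [List.getElem_replicate]
  · rw [List.getElem?_eq_none (by simpa using Nat.le_of_not_lt hi),
      List.getElem?_eq_none (by simpa using Nat.le_of_not_lt hi)]
    rfl

theorem loopA_stop (presents : List Int) (size : Int) (is : List Nat) (acc : List (List Int))
    (h : acc ≠ []) : loopA presents size is acc = acc := by
  cases is with
  | nil => rfl
  | cons i is' =>
    show (if acc.length > 0 then acc else _) = acc
    rw [if_pos (by simpa [List.length_pos_iff] using h)]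

theorem loopA_eq_loopB (presents : List Int) (size : Int) : ∀ (is : List Nat),
    loopA presents size is [] =
      loopB presents size (is.map (fun i => (pySubsets presents).filter (fun s => s.length == i))) := by
  have hF : (fun s : List Int => s.sum == size && isDivA (presents.length + 1) presents s size)
      = (fun s => s.sum == size &&
          canSplitB (presents.length + 1) (presents.filter (fun p => !(s.contains p))) size) := by
    funext s; rw [isDivA_eq]
  intro is
  induction is with
  | nil => rfl
  | cons i is ih =>
    have hGi : ((pySubsets presents).filter (fun s => s.length == i)).filter
        (fun s => s.sum == size &&
          canSplitB (presents.length + 1) (presents.filter (fun p => !(s.contains p))) size)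
        = (pyCombos presents i).filter
          (fun s => s.sum == size && isDivA (presents.length + 1) presents s size) := by
      rw [filter_len_pySubsets, hF]
    simp only [loopA, loopB, List.map_cons]
    rw [if_neg (by simp), List.nil_append, hGi]
    by_cases hGA : (pyCombos presents i).filter
        (fun s => s.sum == size && isDivA (presents.length + 1) presents s size) = []
    · rw [hGA, if_neg (by simp)]
      exact ih
    · rw [loopA_stop _ _ _ _ hGA, if_pos (by simpa [List.length_pos_iff] using hGA)]

-- ===== VERDICT (by name: the statement is the Claim_ definition above) =====
theorem getSubsetsOfSize_spec : Claim_equal_getSubsetsOfSize := by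
  intro presents size _ _
  unfold Spec_getSubsetsOfSize getSubsetsOfSize getSubsetsOfSize_alt
  rw [buckets_eq, ← loopA_eq_loopB]
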